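-- pv_equiv track=rewrite | github.com/lukiiimohhU/continental | backend/game_logic.py | try_sequence
-- ===== SOURCE A (Python) =====
-- def try_sequence(values, num_jokers, total_length, cyclic):
--     """Try to form a sequence with given values and jokers"""
--     if len(values) == 0:
--         return False
--
--     # For cyclic, convert Ace to 14 if there are high cards
--     if cyclic and 1 in values and any(v >= 11 for v in values):
--         values_adjusted = []
--         for v in values:
--             if v == 1:
--                 values_adjusted.append(14)
--             else:
--                 values_adjusted.append(v)
--         values = sorted(values_adjusted)
--
--     min_val = values[0]
--     max_val = values[-1]
--     span = max_val - min_val + 1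
--
--     if span != total_length:
--         return False
--
--     # Check gaps can be filled with jokers
--     all_positions = set(range(min_val, max_val + 1))
--     filled_positions = set(values)
--     gaps = sorted(all_positions - filled_positions)
--
--     if len(gaps) != num_jokers:
--         return False
--
--     # Check no consecutive jokers
--     sequence = []
--     for pos in range(min_val, max_val + 1):
--         if pos in filled_positions:
--             sequence.append('card')
--         else:
--             sequence.append('joker')
--
--     for i in range(len(sequence) - 1):
--         if sequence[i] == 'joker' and sequence[i + 1] == 'joker':
--             return False
--
--     return True
-- ===== SOURCE B (Python) =====
-- def try_sequence(values, num_jokers, total_length, cyclic):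
--     """Try to form a sequence with given values and jokers"""
--     if len(values) == 0:
--         return False
--
--     # For cyclic, convert Ace to 14 if there are high cards
--     if cyclic and 1 in values and any(v >= 11 for v in values):
--         values = sorted(14 if v == 1 else v for v in values)
--
--     lo = values[0]
--     hi = values[-1]
--     if hi - lo + 1 != total_length:
--         return False
--
--     # Walk the sorted distinct present values in [lo, hi]: each pair of
--     # neighbours (v, w) needs w - v - 1 jokers between them; two jokers would
--     # be adjacent exactly when w - v > 2.  Total jokers needed must match.
--     present = sorted(v for v in set(values) if lo <= v <= hi)
--     needed = 0
--     for v, w in zip(present, present[1:]):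
--         if w - v > 2:
--             return False
--         needed += w - v - 1
--     return needed == num_jokers
-- ===== Notes on version B (the rewrite author's own statement) =====
-- stated objective: alternative
-- what changed: B never materializes the gap positions or A's 'card'/'joker' span array: it walks the sorted distinct present values pairwise, rejecting any neighbour gap wider than 2 (which is exactly two adjacent jokers) and summing the joker widths w-v-1 to compare with num_jokers, so the span range is never iterated at all.
import Mathlib
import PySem

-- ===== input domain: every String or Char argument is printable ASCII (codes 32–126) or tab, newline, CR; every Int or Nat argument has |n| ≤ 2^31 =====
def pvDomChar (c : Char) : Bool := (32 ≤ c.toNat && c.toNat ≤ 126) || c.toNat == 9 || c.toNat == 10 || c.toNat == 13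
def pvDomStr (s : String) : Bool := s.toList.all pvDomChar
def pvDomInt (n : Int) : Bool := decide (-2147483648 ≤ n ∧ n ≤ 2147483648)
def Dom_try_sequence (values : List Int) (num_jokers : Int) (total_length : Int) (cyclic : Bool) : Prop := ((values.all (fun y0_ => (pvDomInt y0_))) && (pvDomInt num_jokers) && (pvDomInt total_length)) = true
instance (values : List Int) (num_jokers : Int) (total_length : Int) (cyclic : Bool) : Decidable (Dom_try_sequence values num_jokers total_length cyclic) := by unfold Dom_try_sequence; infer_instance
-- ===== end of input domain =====

-- B never builds the gap list or A's 'card'/'joker' span array: it walks the sorted distinct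
-- present values pairwise, rejecting a neighbour gap wider than 2 and summing joker widths.

-- ===== PORT A =====
-- A's explicit append loop building values_adjusted
def pvAdjustLoop_A (values : List Int) : List Int :=
  values.foldl (fun acc v => acc ++ [if v == 1 then (14 : Int) else v]) []

-- A's final loop: 'for i in range(len(sequence)-1): if sequence[i]=='joker' and sequence[i+1]=='joker': return False'
-- (early return False ⇔ any); indices produced by the range are in bounds, so pyGetD is exact
def pvScan_A (sequence : List String) : Bool :=
  (PySem.List.pyRange 0 ((sequence.length : Int) - 1)).any
    (fun i => PySem.List.pyGetD sequence i "" == "joker" && PySem.List.pyGetD sequence (i + 1) "" == "joker")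

-- A's code from 'min_val = values[0]' on (values already adjusted)
def pvRest_A (values : List Int) (num_jokers : Int) (total_length : Int) : Bool :=
  let min_val := PySem.List.pyGetD values 0 0
  let max_val := PySem.List.pyGetD values (-1) 0
  let span := max_val - min_val + 1
  if span ≠ total_length then false
  else
    let all_positions : PySem.Set Int := PySem.Set.ofList (PySem.List.pyRange min_val (max_val + 1))
    let filled_positions : PySem.Set Int := PySem.Set.ofList values
    -- sorted(set - set): the set difference is order-normalised by sorted(), so exact
    let gaps := PySem.List.sorted (PySem.Set.diff all_positions filled_positions) (fun x => x)
    if (gaps.length : Int) ≠ num_jokers then false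
    else
      let sequence := (PySem.List.pyRange min_val (max_val + 1)).foldl
        (fun acc pos => acc ++ [if PySem.Set.contains filled_positions pos then "card" else "joker"]) []
      if pvScan_A sequence then false else true

def try_sequence (values : List Int) (num_jokers : Int) (total_length : Int) (cyclic : Bool) : Bool :=
  if values.length = 0 then false
  else
    let values :=
      if cyclic && values.contains 1 && values.any (fun v => decide (11 ≤ v)) then
        PySem.List.sorted (pvAdjustLoop_A values) (fun x => x)
      else values
    pvRest_A values num_jokers total_length

-- ===== PORT B =====
-- B's loop 'for v, w in zip(present, present[1:])' with its early return and accumulator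
def pvWalk_B : List Int → Int → Int → Bool
  | v :: w :: rest, needed, nj =>
      if w - v > 2 then false else pvWalk_B (w :: rest) (needed + (w - v - 1)) nj
  | _, needed, nj => needed == nj

-- B's code from 'lo = values[0]' on (values already adjusted)
def pvRest_B (values : List Int) (num_jokers : Int) (total_length : Int) : Bool :=
  let lo := PySem.List.pyGetD values 0 0
  let hi := PySem.List.pyGetD values (-1) 0
  if hi - lo + 1 ≠ total_length then false
  else
    -- sorted(generator over set(values)): sorted without key, so the set's order is not observed
    let present := PySem.List.sorted
      ((PySem.Set.ofList values).filter (fun v => decide (lo ≤ v) && decide (v ≤ hi))) (fun x => x)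
    pvWalk_B present 0 num_jokers

def try_sequence_alt (values : List Int) (num_jokers : Int) (total_length : Int) (cyclic : Bool) : Bool :=
  if values.length = 0 then false
  else
    let values :=
      if cyclic && values.contains 1 && values.any (fun v => decide (11 ≤ v)) then
        PySem.List.sorted (values.map (fun v => if v == 1 then (14 : Int) else v)) (fun x => x)
      else values
    pvRest_B values num_jokers total_length

-- ===== PRECONDITION & SPEC =====
def Spec_try_sequence (values : List Int) (num_jokers : Int) (total_length : Int) (cyclic : Bool) (out : Bool) : Prop := out = try_sequence_alt values num_jokers total_length cyclic
instance (values : List Int) (num_jokers : Int) (total_length : Int) (cyclic : Bool) (out : Bool) : Decidable (Spec_try_sequence values num_jokers total_length cyclic out) := by unfold Spec_try_sequence; infer_instance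

-- ===== CLAIM (what is proved, stated in full; the proofs are below) =====
def Claim_equal_try_sequence : Prop := ∀ (values : List Int) (num_jokers : Int) (total_length : Int) (cyclic : Bool), Dom_try_sequence values num_jokers total_length cyclic → Spec_try_sequence values num_jokers total_length cyclic (try_sequence values num_jokers total_length cyclic)

-- ===== LEMMAS AND PROOFS =====

-- A's append loop is a map
lemma pvAdjustLoop_A_eq (values : List Int) :
    pvAdjustLoop_A values = values.map (fun v => if v == 1 then (14 : Int) else v) := by
  unfold pvAdjustLoop_A
  simpa using PySem.List.foldl_append_singleton_eq_map (fun v => if v == 1 then (14 : Int) else v) values []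

-- proof-only intermediate: A's tail in gap-list form (gaps filtered off the range, scanned pairwise)
def pvNoadj (l : List Int) : Bool := (l.zip l.tail).all (fun ab => decide (ab.2 - ab.1 ≠ 1))

def pvGapForm (values : List Int) (num_jokers : Int) (total_length : Int) : Bool :=
  let lo := PySem.List.pyGetD values 0 0
  let hi := PySem.List.pyGetD values (-1) 0
  if hi - lo + 1 ≠ total_length then false
  else
    let gaps := (PySem.List.pyRange lo (hi + 1)).filter
      (fun p => !(PySem.Set.contains (PySem.Set.ofList values) p))
    if (gaps.length : Int) ≠ num_jokers then false
    else pvNoadj gaps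

-- A's sorted set-difference IS the order-preserving filter of the (already sorted, duplicate-free) range
lemma gaps_eq (lo hi : Int) (t : List Int) :
    PySem.List.sorted (PySem.Set.diff (PySem.Set.ofList (PySem.List.pyRange lo hi)) (PySem.Set.ofList t)) (fun x => x)
      = (PySem.List.pyRange lo hi).filter (fun p => !(PySem.Set.contains (PySem.Set.ofList t) p)) := by
  unfold PySem.Set.diff
  rw [PySem.Set.ofList_eq_self_of_nodup _ (PySem.List.nodup_pyRange_one lo hi)]
  exact PySem.List.sorted_eq_self_of_pairwise _ _
    (((PySem.List.pairwise_lt_pyRange_one lo hi).filter _).imp (fun h => le_of_lt h))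

-- a strictly increasing list has two consecutive entries differing by 1 iff it contains some p and p+1
lemma noadj_iff : ∀ (l : List Int), l.Pairwise (· < ·) →
    (((l.zip l.tail).all (fun ab => decide (ab.2 - ab.1 ≠ 1))) = true ↔ ∀ p ∈ l, p + 1 ∉ l)
  | [], _ => by simp
  | [a], _ => by simp
  | a :: b :: t, hp => by
    have hab : a < b := (List.pairwise_cons.mp hp).1 b (by simp)
    have hat : ∀ x ∈ t, a < x := fun x hx => (List.pairwise_cons.mp hp).1 x (by simp [hx])
    have hbt : ∀ x ∈ t, b < x := fun x hx => (List.pairwise_cons.mp (List.pairwise_cons.mp hp).2).1 x hx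
    have ih := noadj_iff (b :: t) (List.pairwise_cons.mp hp).2
    simp only [List.tail_cons, List.zip_cons_cons, List.all_cons, Bool.and_eq_true,
      decide_eq_true_eq] at ih ⊢
    constructor
    · rintro ⟨h1, h2⟩ p hpmem
      rw [List.mem_cons] at hpmem
      rcases hpmem with rfl | hpmem
      · intro hmem
        rw [List.mem_cons, List.mem_cons] at hmem
        rcases hmem with h | h | h
        · omega
        · omega
        · exact absurd (hbt _ h) (by omega)
      · intro hmem
        have hpgt : a < p := by
          rw [List.mem_cons] at hpmem
          rcases hpmem with rfl | hpmem
          · exact hab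
          · exact hat _ hpmem
        rw [List.mem_cons] at hmem
        rcases hmem with h | hmem
        · omega
        · exact (ih.mp h2 p hpmem) hmem
    · intro h
      refine ⟨?_, ih.mpr ?_⟩
      · intro hb1
        exact (h a (by simp)) (by simp [show a + 1 = b by omega])
      · intro p hpmem hmem
        exact (h p (by simp [hpmem])) (by simp [hmem])

-- turn 'if c p then "card" else "joker" == "joker"' into '!c p'
lemma joker_beq (c : Int → Bool) (p : Int) :
    ((if c p then "card" else "joker") == "joker") = !c p := by
  by_cases h : c p <;> simp [h]

-- A's index scan over the span array, characterised
lemma scanA_iff (lo hi : Int) (c : Int → Bool) :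
    pvScan_A ((PySem.List.pyRange lo hi).map (fun p => if c p then "card" else "joker")) = true
      ↔ ∃ p : Int, lo ≤ p ∧ p + 1 < hi ∧ c p = false ∧ c (p + 1) = false := by
  unfold pvScan_A
  rw [List.any_eq_true]
  constructor
  · rintro ⟨i, hmem, hpred⟩
    rw [PySem.List.mem_pyRange_one] at hmem
    simp only [List.length_map, PySem.List.length_pyRange_one] at hmem
    obtain ⟨h0, h1⟩ := hmem
    obtain ⟨k, rfl⟩ : ∃ k : Nat, i = (k : Int) := ⟨i.toNat, by omega⟩
    have hk1 : (k : Int) + 1 = ((k + 1 : Nat) : Int) := by push_cast; ring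
    rw [hk1, PySem.List.pyGetD_map_pyRange_one _ lo hi k _ (by omega),
      PySem.List.pyGetD_map_pyRange_one _ lo hi (k + 1) _ (by omega),
      joker_beq, joker_beq] at hpred
    simp only [Bool.and_eq_true, Bool.not_eq_true'] at hpred
    refine ⟨lo + (k : Int), by omega, by omega, hpred.1, ?_⟩
    have : lo + (k : Int) + 1 = lo + ((k + 1 : Nat) : Int) := by omega
    rw [this]; exact hpred.2
  · rintro ⟨p, hlo, hhi, hc, hc1⟩
    refine ⟨((p - lo).toNat : Int), ?_, ?_⟩
    · rw [PySem.List.mem_pyRange_one]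
      simp only [List.length_map, PySem.List.length_pyRange_one]
      omega
    · rw [PySem.List.pyGetD_map_pyRange_one _ lo hi (p - lo).toNat _ (by omega)]
      have hk1 : ((p - lo).toNat : Int) + 1 = (((p - lo).toNat + 1 : Nat) : Int) := by omega
      rw [hk1, PySem.List.pyGetD_map_pyRange_one _ lo hi ((p - lo).toNat + 1) _ (by omega)]
      rw [joker_beq, joker_beq]
      have e1 : lo + ((p - lo).toNat : Int) = p := by omega
      have e2 : lo + (((p - lo).toNat + 1 : Nat) : Int) = p + 1 := by omega
      rw [e1, e2]
      simp [hc, hc1]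

-- the final checks of A and the gap form agree
lemma final_eq (lo hi : Int) (c : Int → Bool) :
    (if pvScan_A ((PySem.List.pyRange lo hi).map (fun p => if c p then "card" else "joker")) then false else true)
      = pvNoadj ((PySem.List.pyRange lo hi).filter (fun p => !c p)) := by
  unfold pvNoadj
  have hite : ∀ x : Bool, (if x then false else true) = !x := by decide
  rw [hite, Bool.eq_iff_iff, Bool.not_eq_true']
  have hmem : ∀ p : Int, p ∈ (PySem.List.pyRange lo hi).filter (fun q => !c q)
      ↔ (lo ≤ p ∧ p < hi ∧ c p = false) := by
    intro p
    simp [List.mem_filter, PySem.List.mem_pyRange_one, and_assoc]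
  rw [noadj_iff _ ((PySem.List.pairwise_lt_pyRange_one lo hi).filter _)]
  rw [← Bool.not_eq_true, scanA_iff, not_exists]
  constructor
  · intro h p hp
    rw [hmem] at hp
    intro hp1
    rw [hmem] at hp1
    exact (h p) ⟨hp.1, hp1.2.1, hp.2.2, hp1.2.2⟩
  · intro h p hp
    exact (h p ((hmem p).mpr ⟨hp.1, by omega, hp.2.2.1⟩)) ((hmem (p + 1)).mpr ⟨by omega, hp.2.1, hp.2.2.2⟩)

-- A's post-adjustment code in gap-list form
lemma restA_eq_gap (vs : List Int) (nj tl : Int) : pvRest_A vs nj tl = pvGapForm vs nj tl := by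
  simp only [pvRest_A, pvGapForm, gaps_eq, PySem.List.foldl_append_singleton_eq_map, List.nil_append]
  rw [final_eq]

lemma pvNoadj_cons (a : Int) (l : List Int) (h : ∀ x ∈ l, x - a ≠ 1) :
    pvNoadj (a :: l) = pvNoadj l := by
  cases l with
  | nil => rfl
  | cons b t => simp [pvNoadj, h b (by simp)]

lemma pvWalk_step (v w : Int) (t : List Int) (acc nj : Int) (h : w - v ≤ 2) :
    pvWalk_B (v :: w :: t) acc nj = pvWalk_B (w :: t) (acc + (w - v - 1)) nj := by
  simp [pvWalk_B, show ¬ (w - v > 2) by omega]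

lemma pvMain (c : Int → Bool) : ∀ (n : Nat) (lo : Int), c lo = true → c (lo + n) = true →
    ∀ (acc nj : Int),
    (if acc + ((((PySem.List.pyRange lo (lo + n + 1)).filter (fun p => !c p)).length : Int)) ≠ nj then false
     else pvNoadj ((PySem.List.pyRange lo (lo + n + 1)).filter (fun p => !c p)))
      = pvWalk_B ((PySem.List.pyRange lo (lo + n + 1)).filter c) acc nj := by
  intro n
  induction n using Nat.strong_induction_on with
  | _ n ih =>
  intro lo hlo hhi acc nj
  match n, hhi with
  | 0, hhi =>
    have h1 : lo + ((0:Nat):Int) + 1 = lo + 1 := by push_cast; ring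
    rw [h1, PySem.List.pyRange_one_singleton]
    simp only [List.filter_cons, List.filter_nil, hlo, Bool.not_true, Bool.false_eq_true,
      if_false, if_true, List.length_nil, Nat.cast_zero, add_zero]
    by_cases h : acc = nj <;> simp [pvWalk_B, pvNoadj, h]
  | (m+1), hhi =>
    have hN : lo + ((m+1:Nat):Int) + 1 = lo + (m:Int) + 2 := by push_cast; ring
    have hhi' : c (lo + (m:Int) + 1) = true := by
      have e : lo + ((m+1:Nat):Int) = lo + (m:Int) + 1 := by push_cast; ring
      rw [e] at hhi; exact hhi
    rw [hN]
    rw [PySem.List.pyRange_one_cons (by omega)]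
    simp only [List.filter_cons, hlo, Bool.not_true, Bool.false_eq_true, if_false, if_true]
    by_cases hc1 : c (lo + 1) = true
    · -- next value present: walk consumes it at cost 0
      have hR1 : List.filter c (PySem.List.pyRange (lo+1) (lo + (m:Int) + 2)) =
          (lo+1) :: List.filter c (PySem.List.pyRange (lo+1+1) (lo + (m:Int) + 2)) := by
        rw [PySem.List.pyRange_one_cons (by omega)]; simp [hc1]
      rw [hR1, pvWalk_step _ _ _ _ _ (by omega), show lo + 1 - lo - 1 = 0 by ring, add_zero, ← hR1]
      have key := ih m (by omega) (lo+1) hc1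
        (by rw [show (lo+1:Int) + (m:Int) = lo + (m:Int) + 1 by ring]; exact hhi') acc nj
      rw [show (lo+1:Int) + (m:Int) + 1 = lo + (m:Int) + 2 by ring] at key
      exact key
    · match m, hhi' with
      | 0, hhi' => rw [show lo + ((0:Nat):Int) + 1 = lo + 1 by push_cast; ring] at hhi'
                   exact absurd hhi' hc1
      | (k+1), hhi' =>
        have hk : lo + ((k+1:Nat):Int) + 1 = lo + (k:Int) + 2 := by push_cast; ring
        rw [hk] at hhi'
        rw [show lo + ((k+1:Nat):Int) + 2 = lo + (k:Int) + 3 by push_cast; ring]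
        rw [PySem.List.pyRange_one_cons (by omega)]
        simp only [List.filter_cons, hc1, Bool.not_false, Bool.false_eq_true, if_false, if_true]
        by_cases hc2 : c (lo + 1 + 1) = true
        · -- one joker then a present value: walk consumes a width-1 gap
          have hR2 : List.filter c (PySem.List.pyRange (lo+1+1) (lo + (k:Int) + 3)) =
              (lo+2) :: List.filter c (PySem.List.pyRange (lo+3) (lo + (k:Int) + 3)) := by
            rw [PySem.List.pyRange_one_cons (by omega)]
            simp only [show lo + 1 + 1 = lo + 2 by ring, show lo + 2 + 1 = lo + 3 by ring] at hc2 ⊢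
            simp [hc2]
          rw [hR2, pvWalk_step _ _ _ _ _ (by omega), show lo + 2 - lo - 1 = 1 by ring, ← hR2]
          have hG : pvNoadj ((lo+1) :: List.filter (fun p => !c p)
              (PySem.List.pyRange (lo+1+1) (lo + (k:Int) + 3))) = pvNoadj (List.filter (fun p => !c p)
              (PySem.List.pyRange (lo+1+1) (lo + (k:Int) + 3))) := by
            apply pvNoadj_cons
            intro x hx
            rw [List.mem_filter, PySem.List.mem_pyRange_one] at hx
            have hne : x ≠ lo + 2 := by
              intro h; rw [h] at hx
              simp only [show lo + 2 = lo + 1 + 1 by ring, hc2] at hx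
              simp at hx
            omega
          rw [hG]
          have key := ih k (by omega) (lo+2)
            (by rw [show (lo+2:Int) = lo + 1 + 1 by ring]; exact hc2)
            (by rw [show (lo+2:Int) + (k:Int) = lo + (k:Int) + 2 by ring]; exact hhi') (acc + 1) nj
          rw [show (lo+2:Int) + (k:Int) + 1 = lo + (k:Int) + 3 by ring] at key
          rw [show (lo+1+1:Int) = lo + 2 by ring]
          rw [← key]
          congr 1
          · have e : acc + ((1 + (List.filter (fun p => !c p)
                (PySem.List.pyRange (lo+2) (lo + (k:Int) + 3))).length : Nat) : Int)
              = acc + 1 + ((List.filter (fun p => !c p)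
                (PySem.List.pyRange (lo+2) (lo + (k:Int) + 3))).length : Int) := by push_cast; ring
            simp only [List.length_cons, Nat.add_comm _ 1, e]
        · -- two jokers in a row: both sides reject
          match k, hhi' with
          | 0, hhi' => rw [show lo + ((0:Nat):Int) + 2 = lo + 1 + 1 by push_cast; ring] at hhi'
                       exact absurd hhi' hc2
          | (j+1), hhi' =>
            have hj : lo + ((j+1:Nat):Int) + 2 = lo + (j:Int) + 3 := by push_cast; ring
            rw [hj] at hhi'
            rw [show lo + ((j+1:Nat):Int) + 3 = lo + (j:Int) + 4 by push_cast; ring]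
            rw [PySem.List.pyRange_one_cons (by omega)]
            simp only [List.filter_cons, hc2, Bool.not_false, Bool.false_eq_true, if_false, if_true]
            have hlhs : pvNoadj ((lo+1) :: (lo+1+1) :: List.filter (fun p => !c p)
                (PySem.List.pyRange (lo+1+1+1) (lo + (j:Int) + 4))) = false := by
              simp [pvNoadj]
            have hF : List.filter c (PySem.List.pyRange (lo+1+1+1) (lo + (j:Int) + 4)) ≠ [] := by
              intro hemp
              have : lo + (j:Int) + 3 ∈ List.filter c (PySem.List.pyRange (lo+1+1+1) (lo + (j:Int) + 4)) := by
                rw [List.mem_filter, PySem.List.mem_pyRange_one]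
                exact ⟨⟨by omega, by omega⟩, hhi'⟩
              rw [hemp] at this; simp at this
            obtain ⟨x, t, hxt⟩ := List.exists_cons_of_ne_nil hF
            have hxmem : x ∈ List.filter c (PySem.List.pyRange (lo+1+1+1) (lo + (j:Int) + 4)) := by
              rw [hxt]; simp
            rw [List.mem_filter, PySem.List.mem_pyRange_one] at hxmem
            rw [hxt, hlhs]
            have hrhs : pvWalk_B (lo :: x :: t) acc nj = false := by
              simp [pvWalk_B, show x - lo > 2 by omega]
            rw [hrhs]
            split <;> rfl

lemma present_eq (values : List Int) (lo hi : Int) :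
    PySem.List.sorted
        ((PySem.Set.ofList values).filter (fun v => decide (lo ≤ v) && decide (v ≤ hi))) (fun x => x)
      = (PySem.List.pyRange lo (hi + 1)).filter
          (fun p => PySem.Set.contains (PySem.Set.ofList values) p) := by
  apply PySem.List.sorted_eq_of_perm_of_pairwise_lt
  · rw [List.perm_ext_iff_of_nodup ((PySem.List.nodup_pyRange_one _ _).filter _)
      ((PySem.Set.nodup_ofList values).filter _)]
    intro a
    simp [List.mem_filter, PySem.List.mem_pyRange_one, PySem.Set.mem_ofList, and_comm]
  · exact (PySem.List.pairwise_lt_pyRange_one _ _).filter _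

lemma gap_eq_restB (vs : List Int) (hvs : vs ≠ []) (nj tl : Int) :
    pvGapForm vs nj tl = pvRest_B vs nj tl := by
  unfold pvGapForm pvRest_B
  simp only []
  split
  · rfl
  · rw [present_eq]
    set lo := PySem.List.pyGetD vs 0 0 with hlo
    set hi := PySem.List.pyGetD vs (-1) 0 with hhi
    by_cases hle : lo ≤ hi
    · have hlen : 0 < vs.length := List.length_pos_iff.mpr hvs
      have hclo : PySem.Set.contains (PySem.Set.ofList vs) lo = true := by
        rw [PySem.Set.contains_iff, PySem.Set.mem_ofList, hlo]
        exact PySem.List.pyGetD_mem (xs := vs) (i := 0) (d := 0) (by simp [PySem.Raise.InRange]; omega)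
      have hchi : PySem.Set.contains (PySem.Set.ofList vs) hi = true := by
        rw [PySem.Set.contains_iff, PySem.Set.mem_ofList, hhi]
        exact PySem.List.pyGetD_mem (xs := vs) (i := -1) (d := 0) (by simp [PySem.Raise.InRange]; omega)
      have hn : hi = lo + (((hi - lo).toNat : Nat) : Int) := by omega
      have hm := pvMain (fun p => PySem.Set.contains (PySem.Set.ofList vs) p)
        (hi - lo).toNat lo hclo (by rw [← hn]; exact hchi) 0 nj
      rw [← hn] at hm
      simpa using hm
    · have hnil : PySem.List.pyRange lo (hi + 1) 1 = [] :=
        PySem.List.pyRange_one_eq_nil (by omega)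
      rw [hnil]
      simp only [List.filter_nil, List.length_nil, Nat.cast_zero]
      by_cases h : (0 : Int) = nj <;> simp [pvWalk_B, pvNoadj, h]

-- the two post-adjustment tails agree on every nonempty list
lemma rest_eq (vs : List Int) (hvs : vs ≠ []) (nj tl : Int) : pvRest_A vs nj tl = pvRest_B vs nj tl := by
  rw [restA_eq_gap, gap_eq_restB vs hvs]

-- ===== VERDICT (by name: the statement is the Claim_ definition above) =====
theorem try_sequence_spec : Claim_equal_try_sequence := by
  intro values nj tl cy _
  unfold Spec_try_sequence try_sequence try_sequence_alt
  by_cases h0 : values.length = 0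
  · simp [h0]
  · rw [if_neg h0, if_neg h0, pvAdjustLoop_A_eq]
    split
    · refine rest_eq _ (by simp [PySem.List.sorted_eq_nil_iff]; intro h; simp [h] at h0) nj tl
    · exact rest_eq _ (by intro h; simp [h] at h0) nj tl
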